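-- pv_equiv track=rewrite | github.com/suchanun/ThaiTextSummarization | utils.py | find_paragraph_index
-- ===== SOURCE A (Python) =====
-- def find_paragraph_index(start_indices_of_paragraphs, sentence_index):
--     last_p_index = 0
--     for current_p_index in start_indices_of_paragraphs:
--         if sentence_index == current_p_index:
--             return current_p_index
--         elif sentence_index < current_p_index:
--             return last_p_index
--         last_p_index = current_p_index
--     return last_p_index
-- ===== SOURCE B (Python) =====
-- def _stop_index(start_indices_of_paragraphs, sentence_index):
--     # position of the first start index >= sentence_index (len if none)
--     k = 0
--     for v in start_indices_of_paragraphs: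
--         if v >= sentence_index:
--             return k
--         k += 1
--     return k
--
-- def find_paragraph_index(start_indices_of_paragraphs, sentence_index):
--     k = _stop_index(start_indices_of_paragraphs, sentence_index)
--     if k < len(start_indices_of_paragraphs) and start_indices_of_paragraphs[k] == sentence_index:
--         return sentence_index
--     prefix = start_indices_of_paragraphs[:k]
--     return prefix[-1] if prefix else 0
-- ===== Notes on version B (the rewrite author's own statement) =====
-- stated objective: alternative
-- what changed: Replaces A's accumulator-carrying loop with early returns by a two-phase decomposition: first compute the stop position of the first start index >= sentence_index, then answer by direct indexing and a slice's last element.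
import Mathlib
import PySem

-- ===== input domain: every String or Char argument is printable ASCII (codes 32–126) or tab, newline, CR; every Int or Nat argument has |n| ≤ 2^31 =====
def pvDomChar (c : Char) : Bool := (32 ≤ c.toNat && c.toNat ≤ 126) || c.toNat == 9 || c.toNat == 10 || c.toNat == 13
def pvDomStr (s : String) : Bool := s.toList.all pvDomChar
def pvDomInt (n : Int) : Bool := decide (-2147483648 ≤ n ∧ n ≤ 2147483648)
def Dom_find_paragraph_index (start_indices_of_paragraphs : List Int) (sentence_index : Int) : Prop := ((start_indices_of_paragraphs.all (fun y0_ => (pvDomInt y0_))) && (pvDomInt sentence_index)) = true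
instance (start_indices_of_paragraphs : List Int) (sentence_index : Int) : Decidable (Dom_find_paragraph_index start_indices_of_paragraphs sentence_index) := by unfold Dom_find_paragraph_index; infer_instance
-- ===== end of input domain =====

-- B replaces A's accumulator loop by a different decomposition: find the stop position
-- of the first start index ≥ sentence_index, then answer by direct indexing/slicing
-- (objective: alternative; same O(n) cost).

-- ===== PORT A =====
-- the for-loop of A, carrying last_p_index; early returns become branch results
def pvGoA (s : Int) : List Int → Int → Int
  | [], last => last
  | c :: rest, last =>
      if s = c then c
      else if s < c then last
      else pvGoA s rest c

def find_paragraph_index (start_indices_of_paragraphs : List Int) (sentence_index : Int) : Int :=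
  pvGoA sentence_index start_indices_of_paragraphs 0

-- ===== PORT B =====
-- _stop_index: counts elements before the first one ≥ sentence_index (length if none)
def pvStop (s : Int) : List Int → Nat
  | [] => 0
  | v :: rest => if v ≥ s then 0 else pvStop s rest + 1

def find_paragraph_index_alt (start_indices_of_paragraphs : List Int) (sentence_index : Int) : Int :=
  let k := pvStop sentence_index start_indices_of_paragraphs
  if k < start_indices_of_paragraphs.length ∧
     PySem.List.pyGet? start_indices_of_paragraphs (k : Int) = some sentence_index then
    sentence_index
  else
    let pref := PySem.List.slice start_indices_of_paragraphs (some 0) (some (k : Int))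
    -- 'prefix[-1] if prefix else 0' (pref): pyGet? pref (-1) is none exactly when prefix is empty
    match PySem.List.pyGet? pref (-1) with
    | some v => v
    | none => 0

-- ===== PRECONDITION & SPEC =====
def Spec_find_paragraph_index (start_indices_of_paragraphs : List Int) (sentence_index : Int) (out : Int) : Prop := out = find_paragraph_index_alt start_indices_of_paragraphs sentence_index
instance (start_indices_of_paragraphs : List Int) (sentence_index : Int) (out : Int) : Decidable (Spec_find_paragraph_index start_indices_of_paragraphs sentence_index out) := by unfold Spec_find_paragraph_index; infer_instance

-- ===== CLAIM (what is proved, stated in full; the proofs are below) =====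
def Claim_equal_find_paragraph_index : Prop := ∀ (start_indices_of_paragraphs : List Int) (sentence_index : Int), Dom_find_paragraph_index start_indices_of_paragraphs sentence_index → Spec_find_paragraph_index start_indices_of_paragraphs sentence_index (find_paragraph_index start_indices_of_paragraphs sentence_index)

-- ===== LEMMAS AND PROOFS =====

-- A's loop with accumulator `last` equals B's stop-position formulation with default `last`
lemma pvGoA_eq (s : Int) : ∀ (xs : List Int) (last : Int),
    pvGoA s xs last =
      if pvStop s xs < xs.length ∧
         PySem.List.pyGet? xs ((pvStop s xs : Nat) : Int) = some s then s
      else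
        match PySem.List.pyGet? (PySem.List.slice xs (some 0) (some ((pvStop s xs : Nat) : Int))) (-1) with
        | some v => v
        | none => last := by
  intro xs
  induction xs with
  | nil => intro last; simp [pvGoA, pvStop, PySem.List.slice, PySem.List.pyGet?]
  | cons v rest ih =>
    intro last
    by_cases h1 : s = v
    · subst h1
      simp [pvGoA, pvStop]
    · by_cases h2 : s < v
      · have hv : v ≥ s := le_of_lt h2
        have hvs : v ≠ s := Ne.symm h1
        simp [pvGoA, pvStop, h1, h2, hv, hvs, PySem.List.slice, PySem.List.pyIdx?,
              PySem.List.pyGet?]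
      · have hv : ¬ v ≥ s := by omega
        rw [show pvGoA s (v :: rest) last = pvGoA s rest v by simp [pvGoA, h1, h2]]
        rw [ih v]
        have hstop : pvStop s (v :: rest) = pvStop s rest + 1 := by simp [pvStop, hv]
        rw [hstop]
        have hget : PySem.List.pyGet? (v :: rest) ((pvStop s rest + 1 : Nat) : Int)
            = PySem.List.pyGet? rest ((pvStop s rest : Nat) : Int) := by
          rw [show ((pvStop s rest + 1 : Nat) : Int) = ((pvStop s rest : Nat) : Int) + 1 by push_cast; ring]
          exact PySem.List.pyGet?_cons_succ v rest _
        have hslice : PySem.List.slice (v :: rest) (some 0) (some ((pvStop s rest + 1 : Nat) : Int))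
            = v :: List.take (pvStop s rest) rest := by
          rw [PySem.List.slice_zero_start, PySem.List.slice_to_natCast, List.take_succ_cons]
        have hsl2 : PySem.List.slice rest (some 0) (some ((pvStop s rest : Nat) : Int))
            = List.take (pvStop s rest) rest := by
          rw [PySem.List.slice_zero_start, PySem.List.slice_to_natCast]
        rw [hget, hslice, hsl2]
        simp only [List.length_cons]
        by_cases hc : pvStop s rest < rest.length ∧
            PySem.List.pyGet? rest ((pvStop s rest : Nat) : Int) = some s
        · rw [if_pos hc, if_pos ⟨by omega, hc.2⟩]
        · rw [if_neg hc, if_neg (by push Not at hc ⊢; intro h; exact hc (by omega))]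
          rw [PySem.List.pyGet?_neg_one, PySem.List.pyGet?_neg_one]
          rcases htk : List.take (pvStop s rest) rest with _ | ⟨x, t⟩
          · simp
          · rw [List.getLast?_cons_cons]
            rcases e : (x :: t).getLast? with _ | w
            · exact absurd (List.getLast?_eq_none_iff.mp e) (by simp)
            · rfl

-- ===== VERDICT (by name: the statement is the Claim_ definition above) =====
theorem find_paragraph_index_spec : Claim_equal_find_paragraph_index := by
  intro xs s _
  unfold Spec_find_paragraph_index find_paragraph_index find_paragraph_index_alt
  simpa using pvGoA_eq s xs 0
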